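-- pv_equiv track=rewrite | github.com/ConnorForr/aoc2023 | Day 3/day3_part2.py | top_row_check
-- ===== SOURCE A (Python) =====
-- def top_row_check(top_row):
--     total_parts = 0
--     part_numbers = []
--     adj_number = False
--     number = ""
--
--     for index, value in enumerate(top_row):
--
--         if value.isdigit() and index in [2, 3, 4]:
--             adj_number = True
--             number += value
--
--         elif value.isdigit():
--             number += value
--
--         elif adj_number == True and not value.isdigit():
--             part_numbers.append(int(number))
--             adj_number = False
--             number = ""
--             total_parts += 1
--
--         else:
--             number = ""
--
--     if adj_number:
--         part_numbers.append(int(number))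
--
--         total_parts += 1
--         adj_number = False
--         number = ""
--
--     return total_parts, part_numbers
-- ===== SOURCE B (Python) =====
-- def top_row_check(top_row):
--     # token scan: find each maximal digit run, keep it iff it overlaps columns 2..4
--     total_parts = 0
--     part_numbers = []
--     i = 0
--     n = len(top_row)
--     while i < n:
--         if top_row[i].isdigit():
--             j = i
--             while j < n and top_row[j].isdigit():
--                 j += 1
--             if i <= 4 and j > 2:
--                 part_numbers.append(int(top_row[i:j]))
--                 total_parts += 1
--             i = j
--         else:
--             i += 1
--     return total_parts, part_numbers
-- ===== Notes on version B (the rewrite author's own statement) =====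
-- stated objective: alternative
-- what changed: Replaces A's per-character state machine (adjacency flag plus accumulated number string, with an end-of-loop flush) by a token scan that finds each maximal digit run and keeps it iff its span overlaps columns 2..4.
import Mathlib
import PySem

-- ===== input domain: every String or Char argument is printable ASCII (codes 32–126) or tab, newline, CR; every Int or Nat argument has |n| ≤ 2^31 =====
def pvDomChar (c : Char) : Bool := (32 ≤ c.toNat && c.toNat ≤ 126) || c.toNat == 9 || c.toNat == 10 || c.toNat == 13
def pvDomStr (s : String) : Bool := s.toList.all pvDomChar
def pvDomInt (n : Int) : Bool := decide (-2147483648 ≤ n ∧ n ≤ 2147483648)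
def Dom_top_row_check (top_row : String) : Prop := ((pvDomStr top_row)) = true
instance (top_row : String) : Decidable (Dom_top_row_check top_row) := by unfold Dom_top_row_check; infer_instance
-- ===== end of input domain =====

-- B replaces A's per-character adjacency state machine by a token scan
-- (find each maximal digit run, keep it iff its span overlaps columns 2..4); same cost.

-- ===== PORT A =====
-- loop body; state: (total_parts, part_numbers, adj_number, number)
def pvAStep (s : Int × List Int × Bool × List Char) (iv : Int × Char) :
    Int × List Int × Bool × List Char :=
  let (total, parts, adj, number) := s
  let (index, value) := iv
  if PySem.Chars.isdigit value && [(2 : Int), 3, 4].contains index then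
    (total, parts, true, number ++ [value])
  else if PySem.Chars.isdigit value then
    (total, parts, adj, number ++ [value])
  else if adj == true && !(PySem.Chars.isdigit value) then
    -- int(number): number is a nonempty digit run here, so ofChars? never returns none
    (total + 1, parts ++ [(PySem.Int.ofChars? number).getD 0], false, [])
  else
    (total, parts, adj, [])

def top_row_check (top_row : String) : Int × List Int :=
  let st := (PySem.List.enumerate top_row.toList 0).foldl pvAStep (0, [], false, [])
  let (total, parts, adj, number) := st
  if adj then (total + 1, parts ++ [(PySem.Int.ofChars? number).getD 0]) else (total, parts)

-- ===== PORT B =====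
-- B's while-loop: scan for maximal digit runs; i is the current column
def pvBScan : List Char → Int → Int × List Int
  | [], _ => (0, [])
  | c :: rest, i =>
    if h : PySem.Chars.isdigit c then
      let run := (c :: rest).takeWhile PySem.Chars.isdigit
      let rest' := (c :: rest).dropWhile PySem.Chars.isdigit
      let tail := pvBScan rest' (i + run.length)
      if i ≤ 4 ∧ 2 < i + (run.length : Int) then
        (tail.1 + 1, (PySem.Int.ofChars? run).getD 0 :: tail.2)
      else tail
    else pvBScan rest (i + 1)
  termination_by cs _ => cs.length
  decreasing_by
  · simp only [List.dropWhile_cons, h, if_pos]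
    exact Nat.lt_succ_of_le (List.length_dropWhile_le _ _)
  · simp

def top_row_check_alt (top_row : String) : Int × List Int :=
  let r := pvBScan top_row.toList 0
  (r.1, r.2)

-- ===== PRECONDITION & SPEC =====
def Spec_top_row_check (top_row : String) (out : Int × List Int) : Prop := out = top_row_check_alt top_row
instance (top_row : String) (out : Int × List Int) : Decidable (Spec_top_row_check top_row out) := by unfold Spec_top_row_check; infer_instance

-- ===== CLAIM (what is proved, stated in full; the proofs are below) =====
def Claim_equal_top_row_check : Prop := ∀ (top_row : String), Dom_top_row_check top_row → Spec_top_row_check top_row (top_row_check top_row)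

-- ===== LEMMAS AND PROOFS =====

-- final flush of A's loop state
def pvFlush (s : Int × List Int × Bool × List Char) : Int × List Int :=
  let (total, parts, adj, number) := s
  if adj then (total + 1, parts ++ [(PySem.Int.ofChars? number).getD 0]) else (total, parts)

-- whether a digit run starting at column i with length L touches a column in {2,3,4}
def pvTouched : Int → Nat → Bool
  | _, 0 => false
  | i, L + 1 => [(2 : Int), 3, 4].contains i || pvTouched (i + 1) L

lemma pvTouched_eq (L : Nat) : ∀ i : Int, pvTouched i L = decide (i ≤ 4 ∧ 2 < i + L ∧ 0 < L) := by
  induction L with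
  | zero => intro i; simp [pvTouched]
  | succ n ih =>
    intro i
    rw [Bool.eq_iff_iff]
    simp only [pvTouched, ih, Bool.or_eq_true, List.contains_cons, List.contains_nil,
      Bool.or_false, beq_iff_eq, decide_eq_true_eq]
    push_cast
    omega

lemma pvDropWhile_head_false {α : Type} (p : α → Bool) :
    ∀ (l : List α) (c : α) (rest : List α), l.dropWhile p = c :: rest → p c = false := by
  intro l
  induction l with
  | nil => intro c rest h; simp [List.dropWhile] at h
  | cons a l ih =>
    intro c rest h
    by_cases ha : p a = true
    · rw [List.dropWhile_cons_of_pos ha] at h; exact ih c rest h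
    · rw [List.dropWhile_cons_of_neg ha] at h
      cases h
      exact Bool.eq_false_iff.mpr ha

-- processing a run of digits only accumulates it into `number` and ors `adj` with pvTouched
lemma pvDigits_fold (run : List Char) :
    ∀ (i t : Int) (parts : List Int) (adj : Bool) (num : List Char),
    (∀ c ∈ run, PySem.Chars.isdigit c = true) →
    (PySem.List.enumerate run i).foldl pvAStep (t, parts, adj, num)
      = (t, parts, adj || pvTouched i run.length, num ++ run) := by
  induction run with
  | nil => intro i t parts adj num _; simp [PySem.List.enumerate_nil, pvTouched]
  | cons c rest ih =>
    intro i t parts adj num hdig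
    have hc : PySem.Chars.isdigit c = true := hdig c (by simp)
    rw [PySem.List.enumerate_cons]
    simp only [List.foldl_cons]
    by_cases hmem : [(2 : Int), 3, 4].contains i = true
    · rw [show pvAStep (t, parts, adj, num) (i, c) = (t, parts, true, num ++ [c]) by
        simp only [pvAStep]; rw [if_pos (by rw [hc, hmem]; rfl)]]
      rw [ih (i + 1) t parts true (num ++ [c]) (fun x hx => hdig x (by simp [hx]))]
      rw [show pvTouched i (c :: rest).length
            = ([(2 : Int), 3, 4].contains i || pvTouched (i + 1) rest.length) from rfl]
      rw [hmem]
      simp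
    · have hmem' : [(2 : Int), 3, 4].contains i = false := Bool.eq_false_iff.mpr hmem
      rw [show pvAStep (t, parts, adj, num) (i, c) = (t, parts, adj, num ++ [c]) by
        simp only [pvAStep]
        rw [if_neg (by rw [hc, hmem']; simp), if_pos hc]]
      rw [ih (i + 1) t parts adj (num ++ [c]) (fun x hx => hdig x (by simp [hx]))]
      rw [show pvTouched i (c :: rest).length
            = ([(2 : Int), 3, 4].contains i || pvTouched (i + 1) rest.length) from rfl]
      rw [hmem']
      simp

-- main invariant: at a run boundary (adj = False, number = ""), flushing A's remaining
-- loop equals adding B's scan of the remaining characters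
lemma pvMain (n : Nat) : ∀ (cs : List Char), cs.length ≤ n → ∀ (i t : Int) (parts : List Int),
    pvFlush ((PySem.List.enumerate cs i).foldl pvAStep (t, parts, false, []))
      = (t + (pvBScan cs i).1, parts ++ (pvBScan cs i).2) := by
  induction n with
  | zero =>
    intro cs hcs i t parts
    have : cs = [] := List.length_eq_zero_iff.mp (Nat.le_zero.mp hcs)
    subst this
    simp [PySem.List.enumerate_nil, pvBScan, pvFlush]
  | succ n ih =>
    intro cs hcs i t parts
    match cs with
    | [] => simp [PySem.List.enumerate_nil, pvBScan, pvFlush]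
    | c :: rest =>
      by_cases hc : PySem.Chars.isdigit c = true
      · -- a maximal digit run starts here
        have hsplit : c :: rest = ((c :: rest).takeWhile PySem.Chars.isdigit)
            ++ ((c :: rest).dropWhile PySem.Chars.isdigit) :=
          (List.takeWhile_append_dropWhile).symm
        have hall : ∀ x ∈ (c :: rest).takeWhile PySem.Chars.isdigit,
            PySem.Chars.isdigit x = true := fun x hx => List.mem_takeWhile_imp hx
        have hlen : 0 < ((c :: rest).takeWhile PySem.Chars.isdigit).length := by
          rw [List.takeWhile_cons_of_pos hc]; simp
        have hB : pvBScan (c :: rest) i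
            = (if i ≤ 4 ∧ 2 < i + (((c :: rest).takeWhile PySem.Chars.isdigit).length : Int) then
                 ((pvBScan ((c :: rest).dropWhile PySem.Chars.isdigit)
                     (i + ((c :: rest).takeWhile PySem.Chars.isdigit).length)).1 + 1,
                  (PySem.Int.ofChars? ((c :: rest).takeWhile PySem.Chars.isdigit)).getD 0
                    :: (pvBScan ((c :: rest).dropWhile PySem.Chars.isdigit)
                     (i + ((c :: rest).takeWhile PySem.Chars.isdigit).length)).2)
               else pvBScan ((c :: rest).dropWhile PySem.Chars.isdigit)
                     (i + ((c :: rest).takeWhile PySem.Chars.isdigit).length)) := by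
          rw [pvBScan]; rw [dif_pos hc]
        conv_lhs => rw [hsplit]
        rw [PySem.List.enumerate_append, List.foldl_append,
          pvDigits_fold _ i t parts false [] hall]
        simp only [Bool.false_or, List.nil_append]
        rcases hre : (c :: rest).dropWhile PySem.Chars.isdigit with _ | ⟨c', rest''⟩
        · -- the run reaches the end of the string: A flushes, B emits at end of scan
          rw [hre] at hB
          simp only [PySem.List.enumerate_nil, List.foldl_nil]
          by_cases htouch : i ≤ 4 ∧ 2 < i + (((c :: rest).takeWhile PySem.Chars.isdigit).length : Int)
          · have ht : pvTouched i ((c :: rest).takeWhile PySem.Chars.isdigit).length = true := by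
              rw [pvTouched_eq]
              exact decide_eq_true ⟨htouch.1, htouch.2, hlen⟩
            rw [hB, if_pos htouch, ht]
            simp [pvFlush, pvBScan]
          · have ht : pvTouched i ((c :: rest).takeWhile PySem.Chars.isdigit).length = false := by
              rw [pvTouched_eq]
              exact decide_eq_false (fun h => htouch ⟨h.1, h.2.1⟩)
            rw [hB, if_neg htouch, ht]
            simp [pvFlush, pvBScan]
        · -- a non-digit character follows the run: A closes the number there
          have hc' : PySem.Chars.isdigit c' = false :=
            pvDropWhile_head_false _ (c :: rest) c' rest'' hre
          have hlen'' : rest''.length ≤ n := by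
            have h1 : ((c :: rest).takeWhile PySem.Chars.isdigit).length
                + ((c :: rest).dropWhile PySem.Chars.isdigit).length = (c :: rest).length := by
              rw [← List.length_append, List.takeWhile_append_dropWhile]
            rw [hre] at h1
            simp only [List.length_cons] at h1 hcs
            omega
          rw [hre] at hB
          rw [PySem.List.enumerate_cons, List.foldl_cons]
          have hBtail : pvBScan (c' :: rest'')
              (i + ((c :: rest).takeWhile PySem.Chars.isdigit).length)
              = pvBScan rest'' (i + ((c :: rest).takeWhile PySem.Chars.isdigit).length + 1) := by
            rw [pvBScan, dif_neg (by rw [hc']; simp)]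
          by_cases htouch : i ≤ 4 ∧ 2 < i + (((c :: rest).takeWhile PySem.Chars.isdigit).length : Int)
          · have ht : pvTouched i ((c :: rest).takeWhile PySem.Chars.isdigit).length = true := by
              rw [pvTouched_eq]
              exact decide_eq_true ⟨htouch.1, htouch.2, hlen⟩
            rw [ht]
            rw [show pvAStep (t, parts,  true, (c :: rest).takeWhile PySem.Chars.isdigit)
                  ((i + ((c :: rest).takeWhile PySem.Chars.isdigit).length : Int), c')
                = (t + 1, parts ++ [(PySem.Int.ofChars?
                    ((c :: rest).takeWhile PySem.Chars.isdigit)).getD 0], false, []) by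
              simp only [pvAStep]
              rw [if_neg (by rw [hc']; simp), if_neg (by rw [hc']; simp), if_pos (by rw [hc']; simp)]]
            rw [ih rest'' hlen'']
            rw [hB, if_pos htouch, hBtail]
            simp only [Prod.mk.injEq]
            exact ⟨by ring, by simp⟩
          · have ht : pvTouched i ((c :: rest).takeWhile PySem.Chars.isdigit).length = false := by
              rw [pvTouched_eq]
              exact decide_eq_false (fun h => htouch ⟨h.1, h.2.1⟩)
            rw [ht]
            rw [show pvAStep (t, parts, false, (c :: rest).takeWhile PySem.Chars.isdigit)
                  ((i + ((c :: rest).takeWhile PySem.Chars.isdigit).length : Int), c')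
                = (t, parts, false, []) by
              simp only [pvAStep]
              rw [if_neg (by rw [hc']; simp), if_neg (by rw [hc']; simp),
                if_neg (by simp)]]
            rw [ih rest'' hlen'']
            rw [hB, if_neg htouch, hBtail]
      · -- non-digit character at a boundary: nothing changes
        have hc0 : PySem.Chars.isdigit c = false := Bool.eq_false_iff.mpr hc
        rw [PySem.List.enumerate_cons, List.foldl_cons]
        rw [show pvAStep (t, parts, false, []) (i, c) = (t, parts, false, []) by
          simp only [pvAStep]
          rw [if_neg (by rw [hc0]; simp), if_neg (by rw [hc0]; simp), if_neg (by simp)]]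
        rw [show pvBScan (c :: rest) i = pvBScan rest (i + 1) by
          rw [pvBScan, dif_neg (by rw [hc0]; simp)]]
        exact ih rest (by simpa using Nat.le_of_succ_le_succ hcs) (i + 1) t parts

-- ===== VERDICT (by name: the statement is the Claim_ definition above) =====
theorem top_row_check_spec : Claim_equal_top_row_check := by
  intro s _
  unfold Spec_top_row_check top_row_check top_row_check_alt
  have h := pvMain s.toList.length s.toList (le_refl _) 0 0 []
  simp only [zero_add, List.nil_append] at h
  exact h
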